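-- pv_equiv track=rewrite | github.com/BlazingDB/blazingsql | pyblazing/pyblazing/apiv2/context.py | _sliceRowGroups
-- ===== SOURCE A (Python) =====
-- def _sliceRowGroups(numSlices, files, uri_values, row_groups_ids):
--     total_num_rowgroups = sum([len(x) for x in row_groups_ids])
--     file_index_per_rowgroups = [
--         file_index
--         for file_index, row_groups_for_file in enumerate(row_groups_ids)
--         for row_group in row_groups_for_file
--     ]
--     flattened_rowgroup_ids = [
--         row_group
--         for row_groups_for_file in row_groups_ids
--         for row_group in row_groups_for_file
--     ]
--
--     all_sliced_files = []
--     all_sliced_uri_values = []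
--     all_sliced_row_groups_ids = []
--     remaining = total_num_rowgroups
--     startIndex = 0
--     for i in range(0, numSlices):
--         batchSize = int(remaining / (numSlices - i))
--         file_indexes_for_slice = file_index_per_rowgroups[
--             startIndex : startIndex + batchSize
--         ]
--         unique_file_indexes_for_slice = list(
--             dict.fromkeys(file_indexes_for_slice)
--         )  # lets get the unique indexes, but preserving order
--         sliced_files = [files[i] for i in unique_file_indexes_for_slice]
--         if uri_values is not None and len(uri_values) > 0:
--             sliced_uri_values = [
--                 uri_values[i] for i in unique_file_indexes_for_slice
--             ]
--         else:
--             sliced_uri_values = []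
--
--         sliced_rowgroup_ids = []
--         last_file_index = None
--         for ind, file_index in enumerate(file_indexes_for_slice):
--             if last_file_index is None or file_index != last_file_index:
--                 sliced_rowgroup_ids.append([])
--             sliced_rowgroup_ids[-1].append(flattened_rowgroup_ids[ind + startIndex])
--             last_file_index = file_index
--
--         startIndex = startIndex + batchSize
--         remaining = remaining - batchSize
--
--         all_sliced_files.append(sliced_files)
--         all_sliced_uri_values.append(sliced_uri_values)
--         all_sliced_row_groups_ids.append(sliced_rowgroup_ids)
--
--     return (all_sliced_files, all_sliced_uri_values, all_sliced_row_groups_ids)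
-- ===== SOURCE B (Python) =====
-- def _sliceRowGroups(numSlices, files, uri_values, row_groups_ids):
--     total = sum(len(x) for x in row_groups_ids)
--     has_uri = uri_values is not None and len(uri_values) > 0
--     all_files, all_uris, all_rowgroups = [], [], []
--     remaining = total
--     fi = 0   # cursor: current file index
--     pos = 0  # cursor: position inside row_groups_ids[fi]
--     for i in range(numSlices):
--         batch = remaining // (numSlices - i)
--         need = batch
--         sf, su, sr = [], [], []
--         while need > 0:
--             cur = row_groups_ids[fi]
--             avail = len(cur) - pos
--             if avail == 0:
--                 fi += 1
--                 pos = 0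
--                 continue
--             t = min(need, avail)
--             sf.append(files[fi])
--             if has_uri:
--                 su.append(uri_values[fi])
--             sr.append(cur[pos:pos + t])
--             pos += t
--             need -= t
--         remaining -= batch
--         all_files.append(sf)
--         all_uris.append(su)
--         all_rowgroups.append(sr)
--     return (all_files, all_uris, all_rowgroups)
-- ===== Notes on version B (the rewrite author's own statement) =====
-- stated objective: faster
-- what changed: B replaces A's two flattened parallel arrays (file-index-per-rowgroup and flattened rowgroups) plus per-slice slicing, ordered-dedup and last-file-change tracking by a single (file, position) cursor walked once over the nested row_groups_ids, emitting each slice's files and contiguous rowgroup chunks directly.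
import Mathlib
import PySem

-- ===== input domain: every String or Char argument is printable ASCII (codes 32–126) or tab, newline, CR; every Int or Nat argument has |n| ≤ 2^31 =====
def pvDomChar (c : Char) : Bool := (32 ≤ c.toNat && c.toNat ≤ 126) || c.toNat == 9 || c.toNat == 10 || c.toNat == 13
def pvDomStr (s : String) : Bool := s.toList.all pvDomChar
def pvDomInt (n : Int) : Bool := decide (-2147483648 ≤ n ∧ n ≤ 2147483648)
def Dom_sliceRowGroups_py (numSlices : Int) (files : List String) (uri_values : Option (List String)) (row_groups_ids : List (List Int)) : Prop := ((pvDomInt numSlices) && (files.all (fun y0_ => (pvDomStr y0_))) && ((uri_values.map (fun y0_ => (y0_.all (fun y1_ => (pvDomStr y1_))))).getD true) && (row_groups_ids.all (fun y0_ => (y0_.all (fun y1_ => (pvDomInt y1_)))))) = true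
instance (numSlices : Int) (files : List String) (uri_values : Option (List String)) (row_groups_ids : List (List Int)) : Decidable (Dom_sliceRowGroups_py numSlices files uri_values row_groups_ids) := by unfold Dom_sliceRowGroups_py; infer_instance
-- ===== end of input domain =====

-- B walks one cursor over the nested row_groups_ids instead of building and re-slicing two
-- flattened parallel arrays (objective: alternative decomposition; return value only, no mutation).

-- ===== PORT A =====
-- sliced_rowgroup_ids[-1].append(v): append v to the last sublist (A only calls it with a nonempty list)
def pvAppendLast : List (List Int) → Int → List (List Int)
  | [], _ => []
  | [x], v => [x ++ [v]]
  | x :: xs, v => x :: pvAppendLast xs v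

-- the body of A's 'for i in range(0, numSlices)' loop
def pvStepA (numSlices : Int) (files : List String) (uri_values : Option (List String))
    (fIdx flat : List Int)
    (st : List (List String) × List (List String) × List (List (List Int)) × Int × Int)
    (i : Int) :
    List (List String) × List (List String) × List (List (List Int)) × Int × Int :=
  let remaining := st.2.2.2.1
  let startIndex := st.2.2.2.2
  -- batchSize = int(remaining / (numSlices - i)): exact for |remaining|,|numSlices-i| < 2^53
  let batchSize : Int := PySem.Int.truncdiv remaining (numSlices - i)
  let file_indexes_for_slice := PySem.List.slice fIdx (some startIndex) (some (startIndex + batchSize))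
  -- list(dict.fromkeys(..)) = first occurrences in order
  let uniqueIdx := PySem.List.dedup file_indexes_for_slice
  let sliced_files := uniqueIdx.map (fun j => PySem.List.pyGetD files j "")
  let sliced_uri_values :=
    match uri_values with
    | some u => if 0 < u.length then uniqueIdx.map (fun j => PySem.List.pyGetD u j "") else []
    | none => []
  let g := (PySem.List.enumerate file_indexes_for_slice 0).foldl
    (fun (st2 : List (List Int) × Option Int) p =>
      let newGroup : Bool := match st2.2 with | none => true | some l => decide (p.2 ≠ l)
      let srg := if newGroup then st2.1 ++ [[]] else st2.1
      (pvAppendLast srg (PySem.List.pyGetD flat (p.1 + startIndex) 0), some p.2))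
    ([], none)
  (st.1 ++ [sliced_files], st.2.1 ++ [sliced_uri_values], st.2.2.1 ++ [g.1],
   remaining - batchSize, startIndex + batchSize)

def sliceRowGroups_py (numSlices : Int) (files : List String) (uri_values : Option (List String)) (row_groups_ids : List (List Int)) : List (List String) × List (List String) × List (List (List Int)) :=
  let total : Int := (row_groups_ids.map (fun x => (x.length : Int))).sum
  let file_index_per_rowgroups : List Int :=
    (PySem.List.enumerate row_groups_ids 0).flatMap (fun p => p.2.map (fun _ => p.1))
  let flattened_rowgroup_ids : List Int := row_groups_ids.flatMap (fun l => l)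
  let st := (PySem.List.pyRange 0 numSlices 1).foldl
    (pvStepA numSlices files uri_values file_index_per_rowgroups flattened_rowgroup_ids)
    ([], [], [], total, 0)
  (st.1, st.2.1, st.2.2.1)

-- ===== PORT B =====
-- B's inner while-loop: pull `need` row groups from the cursor (rest = row_groups_ids[fi:], pos
-- inside its head); returns the slice's files/uris/rowgroup chunks and the advanced cursor.
def pvPull (files uvals : List String) (hasUri : Bool) :
    Int → List (List Int) → Nat → Nat →
    List String × List String × List (List Int) × List (List Int) × Nat × Nat
  | need, rest, fi, pos =>
    if need ≤ 0 then ([], [], [], rest, fi, pos)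
    else
      match rest with
      | [] => ([], [], [], [], fi, pos)   -- unreachable: need never exceeds what the cursor has left
      | cur :: rest' =>
        if cur.length - pos = 0 then
          pvPull files uvals hasUri need rest' (fi + 1) 0
        else
          let t := min need.toNat (cur.length - pos)
          let r := pvPull files uvals hasUri (need - (t : Int)) (cur :: rest') fi (pos + t)
          (PySem.List.pyGetD files (fi : Int) "" :: r.1,
           (if hasUri then PySem.List.pyGetD uvals (fi : Int) "" :: r.2.1 else r.2.1),
           ((cur.drop pos).take t) :: r.2.2.1,   -- cur[pos:pos+t] with 0 ≤ pos: exact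
           r.2.2.2)
  termination_by need rest _ _ => need.toNat + rest.length
  decreasing_by all_goals (simp; try omega)

def pvStepB (numSlices : Int) (files uvals : List String) (hasUri : Bool)
    (st : List (List String) × List (List String) × List (List (List Int)) × Int × List (List Int) × Nat × Nat)
    (i : Int) :
    List (List String) × List (List String) × List (List (List Int)) × Int × List (List Int) × Nat × Nat :=
  let remaining := st.2.2.2.1
  let batch : Int := PySem.Int.floordiv remaining (numSlices - i)
  let r := pvPull files uvals hasUri batch st.2.2.2.2.1 st.2.2.2.2.2.1 st.2.2.2.2.2.2
  (st.1 ++ [r.1], st.2.1 ++ [r.2.1], st.2.2.1 ++ [r.2.2.1],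
   remaining - batch, r.2.2.2.1, r.2.2.2.2.1, r.2.2.2.2.2)

def sliceRowGroups_py_alt (numSlices : Int) (files : List String) (uri_values : Option (List String)) (row_groups_ids : List (List Int)) : List (List String) × List (List String) × List (List (List Int)) :=
  let total : Int := (row_groups_ids.map (fun x => (x.length : Int))).sum
  let hasUri : Bool := match uri_values with | some u => decide (0 < u.length) | none => false
  let uvals : List String := uri_values.getD []
  let st := (PySem.List.pyRange 0 numSlices 1).foldl
    (pvStepB numSlices files uvals hasUri)
    ([], [], [], total, row_groups_ids, 0, 0)
  (st.1, st.2.1, st.2.2.1)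

-- ===== PRECONDITION & SPEC =====
-- Pre_ excludes exactly the inputs where Python A raises IndexError: numSlices ≥ 1 and some file
-- with row groups has no entry in files (or in a nonempty uri_values).
def Pre_sliceRowGroups_py (numSlices : Int) (files : List String) (uri_values : Option (List String)) (row_groups_ids : List (List Int)) : Prop :=
  numSlices ≤ 0 ∨
    ∀ j ∈ List.range row_groups_ids.length,
      row_groups_ids.getD j [] ≠ [] →
        j < files.length ∧ ∀ u, uri_values = some u → u ≠ [] → j < u.length
instance (numSlices : Int) (files : List String) (uri_values : Option (List String)) (row_groups_ids : List (List Int)) : Decidable (Pre_sliceRowGroups_py numSlices files uri_values row_groups_ids) := by unfold Pre_sliceRowGroups_py; infer_instance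

def pvWitness_sliceRowGroups_py : Int × List String × Option (List String) × List (List Int) :=
  (2, ["a", "b"], some ["x", "y"], [[1], [2, 3]])

def Spec_sliceRowGroups_py (numSlices : Int) (files : List String) (uri_values : Option (List String)) (row_groups_ids : List (List Int)) (out : List (List String) × List (List String) × List (List (List Int))) : Prop := out = sliceRowGroups_py_alt numSlices files uri_values row_groups_ids
instance (numSlices : Int) (files : List String) (uri_values : Option (List String)) (row_groups_ids : List (List Int)) (out : List (List String) × List (List String) × List (List (List Int))) : Decidable (Spec_sliceRowGroups_py numSlices files uri_values row_groups_ids out) := by unfold Spec_sliceRowGroups_py; infer_instance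

-- ===== CLAIM (what is proved, stated in full; the proofs are below) =====
def Claim_equal_sliceRowGroups_py : Prop := ∀ (numSlices : Int) (files : List String) (uri_values : Option (List String)) (row_groups_ids : List (List Int)), Dom_sliceRowGroups_py numSlices files uri_values row_groups_ids → Pre_sliceRowGroups_py numSlices files uri_values row_groups_ids → Spec_sliceRowGroups_py numSlices files uri_values row_groups_ids (sliceRowGroups_py numSlices files uri_values row_groups_ids)

-- ===== LEMMAS AND PROOFS =====

-- file indexes of the flattened row groups, starting at file number k
def pvFIdxFrom (k : Int) : List (List Int) → List Int
  | [] => []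
  | l :: ls => List.replicate l.length k ++ pvFIdxFrom (k + 1) ls

-- group the (file index, row group) pairs into runs of equal file index
def pvGroupAux (l : Int) (cur : List Int) : List (Int × Int) → List (List Int)
  | [] => [cur]
  | (f, v) :: rest => if f = l then pvGroupAux l (cur ++ [v]) rest else cur :: pvGroupAux f [v] rest

def pvGroup : List (Int × Int) → List (List Int)
  | [] => []
  | (f, v) :: rest => pvGroupAux f [v] rest

-- A's grouping loop body, on a (file index, row group value) pair
def pvBstep (st2 : List (List Int) × Option Int) (q : Int × Int) : List (List Int) × Option Int :=
  let newGroup : Bool := match st2.2 with | none => true | some l => decide (q.1 ≠ l)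
  (pvAppendLast (if newGroup then st2.1 ++ [[]] else st2.1) q.2, some q.1)

lemma pvEnumFlat (ls : List (List Int)) : ∀ (s : Int),
    (PySem.List.enumerate ls s).flatMap (fun p => p.2.map (fun _ => p.1)) = pvFIdxFrom s ls := by
  induction ls with
  | nil => intro s; simp [PySem.List.enumerate_nil, pvFIdxFrom]
  | cons x ls ih =>
    intro s
    simp only [PySem.List.enumerate_cons, List.flatMap_cons, pvFIdxFrom, ih]
    simp [List.map_const']

lemma pvFIdxFrom_length : ∀ (ls : List (List Int)) (k : Int), (pvFIdxFrom k ls).length = ls.flatten.length := by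
  intro ls
  induction ls with
  | nil => intro k; simp [pvFIdxFrom]
  | cons x ls ih => intro k; simp [pvFIdxFrom, ih]

lemma pvMem_fIdxFrom : ∀ (ls : List (List Int)) (k x : Int), x ∈ pvFIdxFrom k ls → k ≤ x := by
  intro ls
  induction ls with
  | nil => intro k x h; simp [pvFIdxFrom] at h
  | cons y ls ih =>
    intro k x h
    simp only [pvFIdxFrom, List.mem_append, List.mem_replicate] at h
    rcases h with ⟨-, rfl⟩ | h
    · exact le_refl x
    · have := ih (k + 1) x h; omega

lemma pvFoldEnum (flat : List Int) : ∀ (w : List Int) (a c : Nat) (st2 : List (List Int) × Option Int),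
    c + a + w.length ≤ flat.length →
    (PySem.List.enumerate w (a : Int)).foldl
        (fun st2 p => pvBstep st2 (p.2, PySem.List.pyGetD flat (p.1 + (c : Int)) 0)) st2
      = (w.zip ((flat.drop (a + c)).take w.length)).foldl pvBstep st2 := by
  intro w
  induction w with
  | nil => intro a c st2 _; simp [PySem.List.enumerate_nil]
  | cons x w ih =>
    intro a c st2 hlen
    have hac : a + c < flat.length := by simp at hlen; omega
    have hget : PySem.List.pyGetD flat ((a : Int) + (c : Int)) 0 = flat[a + c] := by
      have : ((a : Int) + (c : Int)) = ((a + c : Nat) : Int) := by push_cast; ring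
      rw [this, PySem.List.pyGetD_natCast, List.getD_eq_getElem flat 0 hac]
    rw [PySem.List.enumerate_cons, List.foldl_cons]
    have hdrop : flat.drop (a + c) = flat[a + c] :: flat.drop (a + c + 1) :=
      List.drop_eq_getElem_cons hac
    rw [hdrop]
    simp only [List.length_cons, List.take_succ_cons, List.zip_cons_cons, List.foldl_cons, hget]
    have hcast : (a : Int) + 1 = ((a + 1 : Nat) : Int) := by push_cast; ring
    rw [hcast, ih (a + 1) c _ (by simp at hlen ⊢; omega)]
    have : a + 1 + c = a + c + 1 := by omega
    rw [this]

lemma pvAppendLast_append : ∀ (xs : List (List Int)) (x : List Int) (v : Int),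
    pvAppendLast (xs ++ [x]) v = xs ++ [x ++ [v]] := by
  intro xs
  induction xs with
  | nil => intro x v; simp [pvAppendLast]
  | cons y ys ih =>
    intro x v
    cases ys with
    | nil => simp [pvAppendLast]
    | cons z zs =>
      show y :: pvAppendLast ((z :: zs) ++ [x]) v = y :: ((z :: zs) ++ [x ++ [v]])
      rw [ih]

lemma pvFoldGroupAux : ∀ (pairs : List (Int × Int)) (l : Int) (cur : List Int) (g : List (List Int)),
    (pairs.foldl pvBstep (g ++ [cur], some l)).1 = g ++ pvGroupAux l cur pairs := by
  intro pairs
  induction pairs with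
  | nil => intro l cur g; simp [pvGroupAux]
  | cons q rest ih =>
    intro l cur g
    obtain ⟨f, v⟩ := q
    by_cases hf : f = l
    · subst hf
      have hstep : pvBstep (g ++ [cur], some f) (f, v) = (g ++ [cur ++ [v]], some f) := by
        simp [pvBstep, pvAppendLast_append]
      rw [List.foldl_cons, hstep, ih f (cur ++ [v]) g]
      simp [pvGroupAux]
    · have hstep : pvBstep (g ++ [cur], some l) (f, v) = ((g ++ [cur]) ++ [[v]], some f) := by
        have happ : pvAppendLast (g ++ [cur, []]) v = g ++ [cur, [v]] := by
          simpa using pvAppendLast_append (g ++ [cur]) [] v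
        simp [pvBstep, hf, happ]
      rw [List.foldl_cons, hstep, ih f [v] (g ++ [cur])]
      simp [pvGroupAux, hf]

lemma pvFoldGroup (pairs : List (Int × Int)) :
    (pairs.foldl pvBstep ([], none)).1 = pvGroup pairs := by
  cases pairs with
  | nil => simp [pvGroup]
  | cons q rest =>
    obtain ⟨f, v⟩ := q
    have hstep : pvBstep ([], none) (f, v) = ([] ++ [[v]], some f) := by
      simp [pvBstep, pvAppendLast]
    rw [List.foldl_cons, hstep, pvFoldGroupAux rest f [v] []]
    simp [pvGroup]

lemma pvFoldAdd_disjoint : ∀ (l : List Int) (acc2 acc1 : List Int), (∀ x ∈ l, x ∉ acc1) →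
    l.foldl PySem.Set.add (acc1 ++ acc2) = acc1 ++ l.foldl PySem.Set.add acc2 := by
  intro l
  induction l with
  | nil => intro acc2 acc1 _; simp
  | cons x l ih =>
    intro acc2 acc1 h
    have hx : x ∉ acc1 := h x (List.mem_cons_self)
    by_cases hx2 : x ∈ acc2
    · have ha : PySem.Set.add (acc1 ++ acc2) x = acc1 ++ acc2 := by
        simp [PySem.Set.add, PySem.Set.contains, hx2]
      have hb : PySem.Set.add acc2 x = acc2 := by simp [PySem.Set.add, PySem.Set.contains, hx2]
      simp only [List.foldl_cons]
      rw [ha, hb, ih acc2 acc1 (fun y hy => h y (List.mem_cons_of_mem _ hy))]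
    · have hmem : x ∉ acc1 ++ acc2 := by simp [hx, hx2]
      have ha : PySem.Set.add (acc1 ++ acc2) x = acc1 ++ (acc2 ++ [x]) := by
        simp [PySem.Set.add, PySem.Set.contains, hmem]
      have hb : PySem.Set.add acc2 x = acc2 ++ [x] := by
        simp [PySem.Set.add, PySem.Set.contains, hx2]
      simp only [List.foldl_cons]
      rw [ha, hb, ih (acc2 ++ [x]) acc1 (fun y hy => h y (List.mem_cons_of_mem _ hy))]

lemma pvFoldAdd_replicate_mem : ∀ (t : Nat) (a : Int) (acc : List Int), a ∈ acc →
    (List.replicate t a).foldl PySem.Set.add acc = acc := by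
  intro t
  induction t with
  | zero => intro a acc _; simp
  | succ t ih =>
    intro a acc h
    have : PySem.Set.add acc a = acc := by simp [PySem.Set.add, PySem.Set.contains, h]
    rw [List.replicate_succ, List.foldl_cons, this, ih a acc h]

lemma pvDedup_run (t : Nat) (ht : 1 ≤ t) (a : Int) (l : List Int) (hl : a ∉ l) :
    PySem.List.dedup (List.replicate t a ++ l) = a :: PySem.List.dedup l := by
  rw [PySem.List.dedup_eq_ofList, PySem.Set.ofList_eq_foldl,
    PySem.List.dedup_eq_ofList, PySem.Set.ofList_eq_foldl]
  obtain ⟨t', rfl⟩ : ∃ t', t = t' + 1 := ⟨t - 1, by omega⟩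
  rw [List.foldl_append, List.replicate_succ, List.foldl_cons]
  have hadd : PySem.Set.add [] a = [a] := by simp [PySem.Set.add, PySem.Set.contains]
  rw [hadd, pvFoldAdd_replicate_mem t' a [a] (by simp)]
  have : ([a] : List Int) = [a] ++ [] := by simp
  rw [this, pvFoldAdd_disjoint l [] [a] (fun x hx => by
    simp only [List.mem_singleton]
    rintro rfl; exact hl hx)]
  simp

lemma pvZipRep : ∀ (c : List Int) (a : Int), (List.replicate c.length a).zip c = c.map (fun v => (a, v)) := by
  intro c
  induction c with
  | nil => intro a; simp
  | cons v c ih => intro a; simp [List.replicate_succ, ih]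

lemma pvZipRep' (c : List Int) (a : Int) (n : Nat) (h : n = c.length) :
    (List.replicate n a).zip c = c.map (fun v => (a, v)) := by
  rw [h, pvZipRep]

lemma pvGroupAux_run : ∀ (c : List Int) (a : Int) (cur : List Int) (rest : List (Int × Int)),
    pvGroupAux a cur (c.map (fun v => (a, v)) ++ rest) = pvGroupAux a (cur ++ c) rest := by
  intro c
  induction c with
  | nil => intro a cur rest; simp
  | cons v c ih =>
    intro a cur rest
    simp only [List.map_cons, List.cons_append, pvGroupAux, ih]
    simp

lemma pvGroupAux_ne (a : Int) (cur : List Int) (rest : List (Int × Int)) (h : ∀ p ∈ rest, p.1 ≠ a) :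
    pvGroupAux a cur rest = cur :: pvGroup rest := by
  cases rest with
  | nil => simp [pvGroupAux, pvGroup]
  | cons q r =>
    obtain ⟨f, v⟩ := q
    have hf : f ≠ a := h (f, v) List.mem_cons_self
    simp [pvGroupAux, pvGroup, hf]

lemma pvGroup_run (c : List Int) (hc : c ≠ []) (a : Int) (rest : List (Int × Int))
    (h : ∀ p ∈ rest, p.1 ≠ a) :
    pvGroup (c.map (fun v => (a, v)) ++ rest) = c :: pvGroup rest := by
  cases c with
  | nil => exact absurd rfl hc
  | cons v c =>
    show pvGroupAux a [v] (c.map (fun v => (a, v)) ++ rest) = (v :: c) :: pvGroup rest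
    rw [pvGroupAux_run c a [v] rest, pvGroupAux_ne a ([v] ++ c) rest h]
    simp

lemma pvFIdx_drop : ∀ (ls : List (List Int)) (k : Int) (fi pos : Nat) (h1 : fi < ls.length)
    (h2 : pos ≤ ls[fi].length),
    (pvFIdxFrom k ls).drop ((ls.take fi).flatten.length + pos)
      = List.replicate (ls[fi].length - pos) (k + fi) ++ pvFIdxFrom (k + fi + 1) (ls.drop (fi + 1)) := by
  intro ls
  induction ls with
  | nil => intro k fi pos h1 h2; simp at h1
  | cons x ls ih =>
    intro k fi pos h1 h2
    cases fi with
    | zero =>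
      simp only [List.take_zero, List.flatten_nil, List.length_nil, Nat.zero_add, pvFIdxFrom]
      rw [List.drop_append_of_le_length (by simpa using h2), List.drop_replicate]
      simp
    | succ fi =>
      simp only [List.getElem_cons_succ] at h2 ⊢
      simp only [List.take_succ_cons, List.flatten_cons, List.length_append, pvFIdxFrom,
        List.drop_succ_cons]
      have harr : x.length + (ls.take fi).flatten.length + pos
          = (List.replicate x.length k).length + ((ls.take fi).flatten.length + pos) := by
        simp; omega
      rw [harr, List.drop_length_add_append]
      have h1' : fi < ls.length := by simpa using h1
      rw [ih (k + 1) fi pos h1' h2]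
      have hc1 : k + ((fi + 1 : Nat) : Int) = k + 1 + (fi : Int) := by push_cast; ring
      rw [hc1]

lemma pvFlat_drop : ∀ (ls : List (List Int)) (fi pos : Nat) (h1 : fi < ls.length)
    (h2 : pos ≤ ls[fi].length),
    ls.flatten.drop ((ls.take fi).flatten.length + pos)
      = ls[fi].drop pos ++ (ls.drop (fi + 1)).flatten := by
  intro ls
  induction ls with
  | nil => intro fi pos h1 h2; simp at h1
  | cons x ls ih =>
    intro fi pos h1 h2
    cases fi with
    | zero =>
      simp only [List.take_zero, List.flatten_nil, List.length_nil, Nat.zero_add, List.flatten_cons]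
      rw [List.drop_append_of_le_length (by simpa using h2)]
      simp
    | succ fi =>
      simp only [List.take_succ_cons, List.flatten_cons, List.length_append]
      have harr : x.length + (ls.take fi).flatten.length + pos
          = x.length + ((ls.take fi).flatten.length + pos) := by omega
      rw [harr, List.drop_length_add_append]
      have h1' : fi < ls.length := by simpa using h1
      rw [ih fi pos h1' (by simpa using h2)]
      simp

lemma pvPull_le (files uvals : List String) (hasUri : Bool) (need : Int)
    (rest : List (List Int)) (fi pos : Nat) (h0 : need ≤ 0) :
    pvPull files uvals hasUri need rest fi pos = ([], [], [], rest, fi, pos) := by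
  conv_lhs => rw [pvPull.eq_def]
  simp [h0]

lemma pvPull_skip (files uvals : List String) (hasUri : Bool) (need : Int)
    (cur : List Int) (rest' : List (List Int)) (fi pos : Nat)
    (h0 : ¬ need ≤ 0) (hav : cur.length - pos = 0) :
    pvPull files uvals hasUri need (cur :: rest') fi pos
      = pvPull files uvals hasUri need rest' (fi + 1) 0 := by
  conv_lhs => rw [pvPull.eq_def]
  simp [h0, hav]

lemma pvPull_take (files uvals : List String) (hasUri : Bool) (need : Int)
    (cur : List Int) (rest' : List (List Int)) (fi pos : Nat)
    (h0 : ¬ need ≤ 0) (hav : ¬ cur.length - pos = 0) :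
    pvPull files uvals hasUri need (cur :: rest') fi pos
      = (let t := min need.toNat (cur.length - pos);
         let r := pvPull files uvals hasUri (need - (t : Int)) (cur :: rest') fi (pos + t);
         (PySem.List.pyGetD files (fi : Int) "" :: r.1,
          (if hasUri then PySem.List.pyGetD uvals (fi : Int) "" :: r.2.1 else r.2.1),
          ((cur.drop pos).take t) :: r.2.2.1,
          r.2.2.2)) := by
  conv_lhs => rw [pvPull.eq_def]
  simp [h0, hav]

-- the per-slice core: B's cursor walk produces exactly A's window computations
lemma pvCore : ∀ (m : Nat) (rgs : List (List Int)) (files uvals : List String) (hasUri : Bool)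
    (need : Int) (fi pos : Nat),
    need.toNat + (rgs.drop fi).length ≤ m →
    fi ≤ rgs.length → pos ≤ (rgs.getD fi []).length →
    0 ≤ need →
    (rgs.take fi).flatten.length + pos + need.toNat ≤ rgs.flatten.length →
    ∃ fi' pos',
      pvPull files uvals hasUri need (rgs.drop fi) fi pos =
        ((PySem.List.dedup (((pvFIdxFrom 0 rgs).drop ((rgs.take fi).flatten.length + pos)).take need.toNat)).map (fun j => PySem.List.pyGetD files j ""),
         (if hasUri then (PySem.List.dedup (((pvFIdxFrom 0 rgs).drop ((rgs.take fi).flatten.length + pos)).take need.toNat)).map (fun j => PySem.List.pyGetD uvals j "") else []),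
         pvGroup ((((pvFIdxFrom 0 rgs).drop ((rgs.take fi).flatten.length + pos)).take need.toNat).zip
                   ((rgs.flatten.drop ((rgs.take fi).flatten.length + pos)).take need.toNat)),
         rgs.drop fi', fi', pos') ∧
      fi' ≤ rgs.length ∧ pos' ≤ (rgs.getD fi' []).length ∧
      (rgs.take fi').flatten.length + pos' = (rgs.take fi).flatten.length + pos + need.toNat := by
  intro m
  induction m with
  | zero =>
    intro rgs files uvals hasUri need fi pos hm hfi hpos hneed hbound
    have h0 : need ≤ 0 := by omega
    refine ⟨fi, pos, ?_, hfi, hpos, by omega⟩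
    rw [pvPull_le _ _ _ _ _ _ _ h0, show need.toNat = 0 by omega]
    cases hasUri <;> simp [pvGroup, PySem.List.dedup, PySem.Set.ofList]
  | succ m ih =>
    intro rgs files uvals hasUri need fi pos hm hfi hpos hneed hbound
    by_cases h0 : need ≤ 0
    · refine ⟨fi, pos, ?_, hfi, hpos, by omega⟩
      rw [pvPull_le _ _ _ _ _ _ _ h0, show need.toNat = 0 by omega]
      cases hasUri <;> simp [pvGroup, PySem.List.dedup, PySem.Set.ofList]
    · cases hrest : rgs.drop fi with
      | nil =>
        exfalso
        have hlen : rgs.length ≤ fi := List.drop_eq_nil_iff.mp hrest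
        have hd : rgs.getD fi [] = [] := List.getD_eq_default _ _ hlen
        have hpos0 : pos = 0 := by rw [hd] at hpos; simpa using hpos
        have htake : rgs.take fi = rgs := List.take_of_length_le hlen
        rw [htake, hpos0] at hbound
        omega
      | cons cur rest' =>
        have hfilt : fi < rgs.length := by
          by_contra hh
          rw [List.drop_eq_nil_iff.mpr (by omega)] at hrest
          exact List.cons_ne_nil _ _ hrest.symm
        have hcons : rgs.drop fi = rgs[fi] :: rgs.drop (fi + 1) := List.drop_eq_getElem_cons hfilt
        rw [hrest] at hcons
        obtain ⟨hcur, hrest'⟩ : cur = rgs[fi] ∧ rest' = rgs.drop (fi + 1) := by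
          exact ⟨by injection hcons, by injection hcons⟩
        have hgetD : rgs.getD fi [] = rgs[fi] := List.getD_eq_getElem rgs [] hfilt
        rw [hgetD, ← hcur] at hpos
        by_cases hav : cur.length - pos = 0
        · -- cursor sits at the end of an (exhausted) file: skip to the next file
          have htk : (rgs.take (fi + 1)).flatten.length
              = (rgs.take fi).flatten.length + cur.length := by
            rw [List.take_succ_eq_append_getElem hfilt]
            simp [← hcur]
          have hmeas : need.toNat + (rgs.drop (fi + 1)).length ≤ m := by
            have hdl : (rgs.drop fi).length = rest'.length + 1 := by rw [hrest]; simp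
            rw [← hrest'] ; omega
          have hbound' : (rgs.take (fi + 1)).flatten.length + 0 + need.toNat
              ≤ rgs.flatten.length := by omega
          obtain ⟨fi', pos', heq, h1, h2, h3⟩ :=
            ih rgs files uvals hasUri need (fi + 1) 0 hmeas (by omega) (by simp) (by omega) hbound'
          have hcnt : (rgs.take (fi + 1)).flatten.length + 0
              = (rgs.take fi).flatten.length + pos := by omega
          refine ⟨fi', pos', ?_, h1, h2, by omega⟩
          rw [pvPull_skip _ _ _ _ _ _ _ _ h0 hav, hrest', ← hcnt]
          exact heq
        · -- take t = min(need, avail) row groups from the current file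
          have hcl : cur.length = rgs[fi].length := by rw [hcur]
          have hW0 := pvFIdx_drop rgs 0 fi pos hfilt (by omega)
          have hV0 := pvFlat_drop rgs fi pos hfilt (by omega)
          simp only [zero_add] at hW0
          have hrepl : rgs[fi].length - pos = cur.length - pos := by omega
          rw [hrepl] at hW0
          have ht1 : 1 ≤ min need.toNat (cur.length - pos) := by omega
          -- the window of file indexes splits as a run of fi followed by later files
          have hW : ((pvFIdxFrom 0 rgs).drop ((rgs.take fi).flatten.length + pos)).take need.toNat
              = List.replicate (min need.toNat (cur.length - pos)) (fi : Int)
                ++ (pvFIdxFrom ((fi : Int) + 1) (rgs.drop (fi + 1))).take (need.toNat - (cur.length - pos)) := by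
            rw [hW0, List.take_append, List.take_replicate, List.length_replicate]
          have hchunklen : ((cur.drop pos).take (min need.toNat (cur.length - pos))).length
              = min need.toNat (cur.length - pos) := by
            simp only [List.length_take, List.length_drop]
            omega
          have hV : (rgs.flatten.drop ((rgs.take fi).flatten.length + pos)).take need.toNat
              = (cur.drop pos).take (min need.toNat (cur.length - pos))
                ++ ((rgs.drop (fi + 1)).flatten).take (need.toNat - (cur.length - pos)) := by
            rw [hV0, List.take_append, ← hcur, List.length_drop]
            congr 1
            rcases Nat.le_total need.toNat (cur.length - pos) with hle | hle
            · rw [min_eq_left hle]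
            · rw [min_eq_right hle, List.take_of_length_le (by simp; omega),
                List.take_of_length_le (by simp)]
          -- the recursive call advances the cursor by t inside the current file
          have hmeas : (need - ((min need.toNat (cur.length - pos) : Nat) : Int)).toNat
              + (rgs.drop fi).length ≤ m := by
            have hdl : (rgs.drop fi).length = rest'.length + 1 := by rw [hrest]; simp
            omega
          obtain ⟨fi', pos', heq, h1, h2, h3⟩ :=
            ih rgs files uvals hasUri (need - ((min need.toNat (cur.length - pos) : Nat) : Int))
              fi (pos + min need.toNat (cur.length - pos)) hmeas hfi
              (by rw [hgetD, ← hcur]; omega) (by omega) (by omega)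
          rw [hrest] at heq
          have htoNat : (need - ((min need.toNat (cur.length - pos) : Nat) : Int)).toNat
              = need.toNat - min need.toNat (cur.length - pos) := by omega
          -- the recursive window equals the tail of the present window
          have hW' : ((pvFIdxFrom 0 rgs).drop ((rgs.take fi).flatten.length
                  + (pos + min need.toNat (cur.length - pos)))).take
                (need - ((min need.toNat (cur.length - pos) : Nat) : Int)).toNat
              = (pvFIdxFrom ((fi : Int) + 1) (rgs.drop (fi + 1))).take
                  (need.toNat - (cur.length - pos)) := by
            have hWd := pvFIdx_drop rgs 0 fi (pos + min need.toNat (cur.length - pos)) hfilt (by omega)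
            simp only [zero_add] at hWd
            rw [hWd, htoNat]
            rcases Nat.le_total need.toNat (cur.length - pos) with hle | hle
            · rw [min_eq_left hle]
              simp [Nat.sub_eq_zero_of_le hle]
            · rw [min_eq_right hle]
              have : rgs[fi].length - (pos + (cur.length - pos)) = 0 := by omega
              rw [this]
              simp
          have hV' : (rgs.flatten.drop ((rgs.take fi).flatten.length
                  + (pos + min need.toNat (cur.length - pos)))).take
                (need - ((min need.toNat (cur.length - pos) : Nat) : Int)).toNat
              = ((rgs.drop (fi + 1)).flatten).take (need.toNat - (cur.length - pos)) := by
            have hVd := pvFlat_drop rgs fi (pos + min need.toNat (cur.length - pos)) hfilt (by omega)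
            rw [hVd, htoNat, ← hcur]
            rcases Nat.le_total need.toNat (cur.length - pos) with hle | hle
            · rw [min_eq_left hle]
              simp [Nat.sub_eq_zero_of_le hle]
            · rw [min_eq_right hle]
              have hnil : cur.drop (pos + (cur.length - pos)) = [] :=
                List.drop_eq_nil_of_le (by omega)
              rw [hnil]
              simp
          -- later files in the window are all different from fi
          have hne : ∀ x ∈ (pvFIdxFrom ((fi : Int) + 1) (rgs.drop (fi + 1))).take
              (need.toNat - (cur.length - pos)), (fi : Int) < x := by
            intro x hx
            have := pvMem_fIdxFrom _ _ _ (List.mem_of_mem_take hx)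
            omega
          have hded : PySem.List.dedup (((pvFIdxFrom 0 rgs).drop
                  ((rgs.take fi).flatten.length + pos)).take need.toNat)
              = (fi : Int) :: PySem.List.dedup ((pvFIdxFrom ((fi : Int) + 1)
                  (rgs.drop (fi + 1))).take (need.toNat - (cur.length - pos))) := by
            rw [hW]
            exact pvDedup_run _ ht1 _ _ (fun hmem => by have := hne _ hmem; omega)
          have hzip : (((pvFIdxFrom 0 rgs).drop ((rgs.take fi).flatten.length + pos)).take need.toNat).zip
                ((rgs.flatten.drop ((rgs.take fi).flatten.length + pos)).take need.toNat)
              = ((cur.drop pos).take (min need.toNat (cur.length - pos))).map (fun v => ((fi : Int), v))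
                ++ ((pvFIdxFrom ((fi : Int) + 1) (rgs.drop (fi + 1))).take (need.toNat - (cur.length - pos))).zip
                    (((rgs.drop (fi + 1)).flatten).take (need.toNat - (cur.length - pos))) := by
            rw [hW, hV, List.zip_append (by rw [hchunklen, List.length_replicate]),
              pvZipRep' _ _ _ hchunklen.symm]
          have hgrp : pvGroup ((((pvFIdxFrom 0 rgs).drop ((rgs.take fi).flatten.length + pos)).take need.toNat).zip
                ((rgs.flatten.drop ((rgs.take fi).flatten.length + pos)).take need.toNat))
              = ((cur.drop pos).take (min need.toNat (cur.length - pos)))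
                :: pvGroup (((pvFIdxFrom ((fi : Int) + 1) (rgs.drop (fi + 1))).take (need.toNat - (cur.length - pos))).zip
                    (((rgs.drop (fi + 1)).flatten).take (need.toNat - (cur.length - pos)))) := by
            rw [hzip]
            refine pvGroup_run _ ?_ _ _ ?_
            · intro hnil
              have := congrArg List.length hnil
              rw [hchunklen] at this
              simp at this
              omega
            · intro p hp
              have hmem := (List.of_mem_zip hp).1
              have := hne _ hmem
              omega
          refine ⟨fi', pos', ?_, h1, h2, by omega⟩
          rw [pvPull_take _ _ _ _ _ _ _ _ h0 hav]
          simp only []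
          rw [heq, hded, hgrp, hW', hV']
          cases hasUri <;> simp

-- the slice loops of A and B, coupled step by step
lemma pvOuter : ∀ (is : List Int) (rgs : List (List Int)) (n : Int) (files : List String)
    (uri_values : Option (List String)) (af au : List (List String)) (ar : List (List (List Int)))
    (s fi pos : Nat),
    (∀ i ∈ is, i < n) →
    fi ≤ rgs.length → pos ≤ (rgs.getD fi []).length →
    (rgs.take fi).flatten.length + pos = s → s ≤ rgs.flatten.length →
    (is.foldl (pvStepA n files uri_values (pvFIdxFrom 0 rgs) rgs.flatten)
        (af, au, ar, (rgs.flatten.length : Int) - s, (s : Int))).1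
      = (is.foldl (pvStepB n files (uri_values.getD [])
            (match uri_values with | some u => decide (0 < u.length) | none => false))
          (af, au, ar, (rgs.flatten.length : Int) - s, rgs.drop fi, fi, pos)).1 ∧
    (is.foldl (pvStepA n files uri_values (pvFIdxFrom 0 rgs) rgs.flatten)
        (af, au, ar, (rgs.flatten.length : Int) - s, (s : Int))).2.1
      = (is.foldl (pvStepB n files (uri_values.getD [])
            (match uri_values with | some u => decide (0 < u.length) | none => false))
          (af, au, ar, (rgs.flatten.length : Int) - s, rgs.drop fi, fi, pos)).2.1 ∧
    (is.foldl (pvStepA n files uri_values (pvFIdxFrom 0 rgs) rgs.flatten)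
        (af, au, ar, (rgs.flatten.length : Int) - s, (s : Int))).2.2.1
      = (is.foldl (pvStepB n files (uri_values.getD [])
            (match uri_values with | some u => decide (0 < u.length) | none => false))
          (af, au, ar, (rgs.flatten.length : Int) - s, rgs.drop fi, fi, pos)).2.2.1 := by
  intro is
  induction is with
  | nil =>
    intro rgs n files uri af au ar s fi pos hmem hfi hpos hcnt hsL
    simp
  | cons i is ihis =>
    intro rgs n files uri af au ar s fi pos hmem hfi hpos hcnt hsL
    have hi : i < n := hmem i List.mem_cons_self
    have hdiv : (0 : Int) < n - i := by omega
    have hrem : (0 : Int) ≤ (rgs.flatten.length : Int) - s := by omega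
    have hqe : PySem.Int.floordiv ((rgs.flatten.length : Int) - s) (n - i)
        = ((rgs.flatten.length : Int) - s) / (n - i) := PySem.Int.floordiv_eq_ediv_of_pos hdiv
    have hflooreq : PySem.Int.truncdiv ((rgs.flatten.length : Int) - s) (n - i)
        = PySem.Int.floordiv ((rgs.flatten.length : Int) - s) (n - i) := by
      rw [show PySem.Int.truncdiv ((rgs.flatten.length : Int) - s) (n - i)
            = ((rgs.flatten.length : Int) - s).tdiv (n - i) from rfl,
        hqe, Int.tdiv_eq_ediv_of_nonneg hrem]
    have hq0 : 0 ≤ PySem.Int.floordiv ((rgs.flatten.length : Int) - s) (n - i) := by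
      rw [hqe]; exact Int.ediv_nonneg hrem (by omega)
    have hqle : PySem.Int.floordiv ((rgs.flatten.length : Int) - s) (n - i)
        ≤ (rgs.flatten.length : Int) - s := by
      rw [hqe]; exact Int.ediv_le_self _ hrem
    set q := PySem.Int.floordiv ((rgs.flatten.length : Int) - s) (n - i) with hqdef
    have hsq : s + q.toNat ≤ rgs.flatten.length := by omega
    obtain ⟨fi', pos', heq, h1, h2, h3⟩ :=
      pvCore (q.toNat + (rgs.drop fi).length) rgs files (uri.getD [])
        (match uri with | some u => decide (0 < u.length) | none => false) q fi pos
        (le_refl _) hfi hpos hq0 (by omega)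
    have hfidxlen : (pvFIdxFrom 0 rgs).length = rgs.flatten.length := pvFIdxFrom_length rgs 0
    have hslice : PySem.List.slice (pvFIdxFrom 0 rgs) (some (s : Int)) (some ((s : Int) + q))
        = ((pvFIdxFrom 0 rgs).drop ((rgs.take fi).flatten.length + pos)).take q.toNat := by
      rw [PySem.List.slice_toNat _ (by omega) (by omega), hcnt]
      simp only [Int.toNat_natCast]
      congr 1
      omega
    have hWlen : (((pvFIdxFrom 0 rgs).drop ((rgs.take fi).flatten.length + pos)).take q.toNat).length
        = q.toNat := by
      simp only [List.length_take, List.length_drop, hfidxlen]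
      omega
    have hgrp1 : ((PySem.List.enumerate (((pvFIdxFrom 0 rgs).drop ((rgs.take fi).flatten.length + pos)).take q.toNat) (0 : Int)).foldl
          (fun st2 p => pvBstep st2 (p.2, PySem.List.pyGetD rgs.flatten (p.1 + (s : Int)) 0)) ([], none)).1
        = pvGroup ((((pvFIdxFrom 0 rgs).drop ((rgs.take fi).flatten.length + pos)).take q.toNat).zip
            ((rgs.flatten.drop ((rgs.take fi).flatten.length + pos)).take q.toNat)) := by
      have he := pvFoldEnum rgs.flatten
        (((pvFIdxFrom 0 rgs).drop ((rgs.take fi).flatten.length + pos)).take q.toNat) 0 s ([], none)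
        (by rw [hWlen]; omega)
      simp only [Nat.cast_zero, Nat.zero_add] at he
      rw [he, hWlen, pvFoldGroup, hcnt]
    have hfuneq : (fun (st2 : List (List Int) × Option Int) (p : Int × Int) =>
        (pvAppendLast (if (match st2.2 with | none => true | some l => decide (p.2 ≠ l)) then st2.1 ++ [[]] else st2.1)
            (PySem.List.pyGetD rgs.flatten (p.1 + (s : Int)) 0), some p.2))
        = (fun (st2 : List (List Int) × Option Int) (p : Int × Int) =>
            pvBstep st2 (p.2, PySem.List.pyGetD rgs.flatten (p.1 + (s : Int)) 0)) := rfl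
    simp only [List.foldl_cons, pvStepA, pvStepB]
    rw [hflooreq, ← hqdef, hslice, heq, hfuneq, hgrp1]
    have huri : (match uri with
        | some u => if 0 < u.length then
            (PySem.List.dedup (((pvFIdxFrom 0 rgs).drop ((rgs.take fi).flatten.length + pos)).take q.toNat)).map
              (fun j => PySem.List.pyGetD u j "")
          else []
        | none => ([] : List String))
        = (if (match uri with | some u => decide (0 < u.length) | none => false) then
            (PySem.List.dedup (((pvFIdxFrom 0 rgs).drop ((rgs.take fi).flatten.length + pos)).take q.toNat)).map
              (fun j => PySem.List.pyGetD (uri.getD []) j "")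
          else []) := by
      cases uri with
      | none => simp
      | some u => by_cases hu : 0 < u.length <;> simp [hu]
    have hs' : ((s : Int)) + q = ((s + q.toNat : Nat) : Int) := by omega
    have hrem' : (rgs.flatten.length : Int) - ↑s - q
        = (rgs.flatten.length : Int) - ((s + q.toNat : Nat) : Int) := by omega
    rw [huri, hs', hrem']
    exact ihis rgs n files uri _ _ _ (s + q.toNat) fi' pos'
      (fun j hj => hmem j (List.mem_cons_of_mem _ hj)) h1 h2 (by omega) (by omega)


lemma pvTotalEq : ∀ (rgs : List (List Int)), (rgs.map (fun x => (x.length : Int))).sum = (rgs.flatten.length : Int) := by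
  intro rgs
  induction rgs with
  | nil => simp
  | cons x ls ih => simp [ih]

-- ===== VERDICT (by name: the statement is the Claim_ definition above) =====
theorem sliceRowGroups_py_spec : Claim_equal_sliceRowGroups_py := by
  intro n files uri rgs _ _
  unfold Spec_sliceRowGroups_py sliceRowGroups_py sliceRowGroups_py_alt
  rw [pvEnumFlat rgs 0]
  rw [show rgs.flatMap (fun l => l) = rgs.flatten from by simp [List.flatMap_def]]
  rw [pvTotalEq rgs]
  have h := pvOuter (PySem.List.pyRange 0 n 1) rgs n files uri [] [] [] 0 0 0
    (fun i hi => ((PySem.List.mem_pyRange_one).1 hi).2)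
    (by omega) (by simp) (by simp) (by omega)
  simp only [Nat.cast_zero, Int.sub_zero, List.drop_zero] at h
  exact Prod.ext h.1 (Prod.ext h.2.1 h.2.2)
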